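-- pv_equiv track=rewrite | github.com/franklinbaldo/egregora | src/egregora/pipeline.py | _extract_query_from_markdown
-- ===== SOURCE A (Python) =====
-- def _extract_query_from_markdown(markdown: str) -> str:
--     capture = False
--     for line in markdown.splitlines():
--         stripped = line.strip()
--         if capture:
--             if stripped:
--                 return stripped
--             continue
--         if stripped.lower().startswith("**query de busca"):
--             capture = True
--     return ""
-- ===== SOURCE B (Python) =====
-- def _extract_query_from_markdown(markdown: str) -> str:
--     # Backward pass: result[i] = answer of scanning from line i; first_nonempty = first
--     # non-empty stripped line strictly after the current line.
--     first_nonempty = ""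
--     result = ""
--     for line in reversed(markdown.splitlines()):
--         s = line.strip()
--         if s.lower().startswith("**query de busca"):
--             result = first_nonempty
--         if s:
--             first_nonempty = s
--     return result
-- ===== Notes on version B (the rewrite author's own statement) =====
-- stated objective: alternative
-- what changed: Replaced A's forward scan with a boolean capture flag by a single backward pass (reverse iteration) maintaining two accumulators: the first non-empty stripped line below the current one and the answer of scanning from the current line.
import Mathlib
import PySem

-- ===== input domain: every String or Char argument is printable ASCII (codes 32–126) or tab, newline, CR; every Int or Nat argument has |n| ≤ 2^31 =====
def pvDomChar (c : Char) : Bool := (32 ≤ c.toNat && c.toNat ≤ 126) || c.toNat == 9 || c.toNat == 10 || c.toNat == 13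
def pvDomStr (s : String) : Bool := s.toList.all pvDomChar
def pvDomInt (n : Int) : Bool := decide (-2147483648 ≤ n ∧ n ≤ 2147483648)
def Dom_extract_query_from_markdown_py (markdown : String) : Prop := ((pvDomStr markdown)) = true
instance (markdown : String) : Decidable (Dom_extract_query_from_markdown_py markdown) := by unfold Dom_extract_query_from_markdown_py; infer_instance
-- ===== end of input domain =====

-- B replaces A's forward flag-driven scan by a single backward pass over the lines with two accumulators; equivalence proved on all inputs.


-- ===== PORT A =====
-- A's loop: one boolean 'capture' flag threaded through a single forward scan.
def pvA_loop : List String → Bool → String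
  | [], _ => ""
  | line :: rest, capture =>
    let stripped := PySem.Str.strip line
    if capture then
      if stripped ≠ "" then stripped else pvA_loop rest capture
    else if PySem.Str.startswith (PySem.Str.lower stripped) "**query de busca" then
      pvA_loop rest true
    else
      pvA_loop rest false

def extract_query_from_markdown_py (markdown : String) : String :=
  pvA_loop (PySem.Str.splitlines markdown) false

-- ===== PORT B =====
-- one step of B's backward pass; state = (first_nonempty, result)
def pvB_step (st : String × String) (line : String) : String × String :=
  let s := PySem.Str.strip line
  let result := if PySem.Str.startswith (PySem.Str.lower s) "**query de busca" then st.1 else st.2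
  let fne := if s ≠ "" then s else st.1
  (fne, result)

def extract_query_from_markdown_py_alt (markdown : String) : String :=
  ((PySem.Str.splitlines markdown).reverse.foldl pvB_step ("", "")).2

-- ===== PRECONDITION & SPEC =====
def Spec_extract_query_from_markdown_py (markdown : String) (out : String) : Prop := out = extract_query_from_markdown_py_alt markdown
instance (markdown : String) (out : String) : Decidable (Spec_extract_query_from_markdown_py markdown out) := by unfold Spec_extract_query_from_markdown_py; infer_instance

-- ===== CLAIM (what is proved, stated in full; the proofs are below) =====
def Claim_equal_extract_query_from_markdown_py : Prop := ∀ (markdown : String), Dom_extract_query_from_markdown_py markdown → Spec_extract_query_from_markdown_py markdown (extract_query_from_markdown_py markdown)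

-- ===== LEMMAS AND PROOFS =====
-- B's backward fold computes, as a pair, A's scan with capture=True (first non-empty
-- stripped line) and A's scan with capture=False, for the list being folded.
lemma pvB_fold_eq (ls : List String) :
    ls.reverse.foldl pvB_step ("", "") = (pvA_loop ls true, pvA_loop ls false) := by
  induction ls with
  | nil => rfl
  | cons l rest ih =>
    simp only [List.reverse_cons, List.foldl_append, List.foldl_cons, List.foldl_nil, ih,
      pvB_step, pvA_loop]
    by_cases h2 : PySem.Str.startswith (PySem.Str.lower (PySem.Str.strip l)) "**query de busca" <;>
      by_cases h1 : PySem.Str.strip l = "" <;> simp [h1, h2]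

-- ===== VERDICT (by name: the statement is the Claim_ definition above) =====
theorem extract_query_from_markdown_py_spec : Claim_equal_extract_query_from_markdown_py := by
  intro markdown _
  unfold Spec_extract_query_from_markdown_py extract_query_from_markdown_py extract_query_from_markdown_py_alt
  rw [pvB_fold_eq]
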